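-- pv_equiv track=rewrite | github.com/seancurrent527/py_code | ai/level_off/search.py | distanceHeuristic
-- ===== SOURCE A (Python) =====
-- def manhattanDistance(x, y):
--     return abs(x[0] - y[0]) + abs(x[1] - y[1])
--
-- def distanceHeuristic(state, problem):
--     position, grid = state
--     holes, blocks = [], []
--     for r in range(len(grid)):
--         for c in range(len(grid[0])):
--             if grid[r][c] is not None:
--                 if grid[r][c] > 0:
--                     blocks.append((r, c))
--                 elif grid[r][c] < 0:
--                     holes.append((r, c))
--     if not holes or not blocks:
--         return 0
--     nearestBlock = min(blocks, key = lambda x: manhattanDistance(position, x))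
--     nearestHole = min(holes, key = lambda x: manhattanDistance(nearestBlock, x))
--     return manhattanDistance(position, nearestBlock) + manhattanDistance(nearestBlock, nearestHole)
-- ===== SOURCE B (Python) =====
-- def _nearest(origin, grid, w, pred):
--     # nearest matching cell to origin: strict < keeps the first in row-major order,
--     # matching Python min's first-minimum tie-breaking
--     best = None
--     for r, row in enumerate(grid):
--         for c in range(w):
--             v = row[c]
--             if v is not None and pred(v):
--                 d = abs(origin[0] - r) + abs(origin[1] - c)
--                 if best is None or d < best[1]:
--                     best = ((r, c), d)
--     return best
--
-- def distanceHeuristic(state, problem):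
--     position, grid = state
--     if not grid:
--         return 0
--     w = len(grid[0])
--     block = _nearest(position, grid, w, lambda v: v > 0)
--     if block is None:
--         return 0
--     hole = _nearest(block[0], grid, w, lambda v: v < 0)
--     if hole is None:
--         return 0
--     return block[1] + hole[1]
-- ===== Notes on version B (the rewrite author's own statement) =====
-- stated objective: alternative
-- what changed: Instead of materialising hole/block coordinate lists and calling min twice, B scans the grid with a reusable nearest-cell pass that keeps a running (cell, distance) minimum under strict '<' (so ties keep the first cell in row-major order, matching min's tie-breaking), once for the nearest block to the position and once for the nearest hole to that block.
import Mathlib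
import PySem

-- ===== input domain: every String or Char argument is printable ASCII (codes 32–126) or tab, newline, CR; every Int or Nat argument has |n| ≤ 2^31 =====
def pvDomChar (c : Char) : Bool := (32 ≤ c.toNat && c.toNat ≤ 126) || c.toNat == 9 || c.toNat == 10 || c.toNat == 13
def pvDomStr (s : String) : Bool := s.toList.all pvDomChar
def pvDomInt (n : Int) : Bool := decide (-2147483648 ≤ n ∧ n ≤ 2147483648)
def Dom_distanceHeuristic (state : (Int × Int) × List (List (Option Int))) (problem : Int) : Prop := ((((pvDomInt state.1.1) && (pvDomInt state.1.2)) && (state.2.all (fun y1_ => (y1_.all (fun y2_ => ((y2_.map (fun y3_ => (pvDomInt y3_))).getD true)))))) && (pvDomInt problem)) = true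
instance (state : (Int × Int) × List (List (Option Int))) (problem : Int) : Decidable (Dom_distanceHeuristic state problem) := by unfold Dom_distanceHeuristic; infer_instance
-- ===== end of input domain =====

-- B replaces the two materialised coordinate lists + two min() calls by one reusable
-- nearest-cell grid pass (running strict-< minimum, so row-major ties match min's
-- first-minimum choice), run once for the nearest block and once for the nearest hole.

-- ===== PORT A =====
def pvManhattan (x y : Int × Int) : Int := |x.1 - y.1| + |x.2 - y.2|

def distanceHeuristic (state : (Int × Int) × List (List (Option Int))) (problem : Int) : Int :=
  let position := state.1
  let grid := state.2
  let hb := (PySem.List.pyRange 0 (grid.length : Int) 1).foldl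
    (fun (hb : List (Int × Int) × List (Int × Int)) r =>
      (PySem.List.pyRange 0 ((PySem.List.pyGetD grid 0 []).length : Int) 1).foldl
        (fun hb c =>
          match PySem.List.pyGetD (PySem.List.pyGetD grid r []) c none with
          | none => hb
          | some v =>
            if v > 0 then (hb.1, hb.2 ++ [(r, c)])
            else if v < 0 then (hb.1 ++ [(r, c)], hb.2)
            else hb) hb)
    ([], [])
  let holes := hb.1
  let blocks := hb.2
  if holes = [] ∨ blocks = [] then 0
  else
    match PySem.List.min? blocks (fun x => pvManhattan position x) with
    | none => 0   -- unreachable: blocks ≠ []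
    | some nearestBlock =>
      match PySem.List.min? holes (fun x => pvManhattan nearestBlock x) with
      | none => 0   -- unreachable: holes ≠ []
      | some nearestHole =>
        pvManhattan position nearestBlock + pvManhattan nearestBlock nearestHole

-- ===== PORT B =====
def pvNearest (origin : Int × Int) (grid : List (List (Option Int))) (w : Int)
    (pred : Int → Bool) : Option ((Int × Int) × Int) :=
  (PySem.List.enumerate grid).foldl
    (fun best rr =>
      (PySem.List.pyRange 0 w 1).foldl
        (fun best c =>
          match PySem.List.pyGetD rr.2 c none with
          | none => best
          | some v =>
            if pred v then
              let d := |origin.1 - rr.1| + |origin.2 - c|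
              match best with
              | none => some ((rr.1, c), d)
              | some b => if d < b.2 then some ((rr.1, c), d) else best
            else best) best)
    none

def distanceHeuristic_alt (state : (Int × Int) × List (List (Option Int))) (problem : Int) : Int :=
  let position := state.1
  match state.2 with
  | [] => 0
  | g0 :: gs =>
    let grid := g0 :: gs
    let w : Int := (g0.length : Int)
    match pvNearest position grid w (fun v => v > 0) with
    | none => 0
    | some block =>
      match pvNearest block.1 grid w (fun v => v < 0) with
      | none => 0
      | some hole => block.2 + hole.2

-- ===== PRECONDITION & SPEC =====
-- Pre_ excludes only ragged grids on which some row is shorter than row 0: there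
-- Python A raises IndexError (grid[r][c]) and returns no value.
def Pre_distanceHeuristic (state : (Int × Int) × List (List (Option Int))) (problem : Int) : Prop :=
  ∀ row ∈ state.2, (PySem.List.pyGetD state.2 0 []).length ≤ row.length
instance (state : (Int × Int) × List (List (Option Int))) (problem : Int) : Decidable (Pre_distanceHeuristic state problem) := by unfold Pre_distanceHeuristic; infer_instance

def pvWitness_distanceHeuristic : ((Int × Int) × List (List (Option Int))) × Int :=
  (((0, 0), [[some 1, none], [none, some (-1)]]), 0)

def Spec_distanceHeuristic (state : (Int × Int) × List (List (Option Int))) (problem : Int) (out : Int) : Prop := out = distanceHeuristic_alt state problem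
instance (state : (Int × Int) × List (List (Option Int))) (problem : Int) (out : Int) : Decidable (Spec_distanceHeuristic state problem out) := by unfold Spec_distanceHeuristic; infer_instance

-- ===== CLAIM (what is proved, stated in full; the proofs are below) =====
def Claim_equal_distanceHeuristic : Prop := ∀ (state : (Int × Int) × List (List (Option Int))) (problem : Int), Dom_distanceHeuristic state problem → Pre_distanceHeuristic state problem → Spec_distanceHeuristic state problem (distanceHeuristic state problem)


-- ===== LEMMAS AND PROOFS =====

-- the row-major cell sequence both loops traverse: ((r, c), value)
def pvRowCells (r : Int) (row : List (Option Int)) (w : Int) : List ((Int × Int) × Option Int) :=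
  (PySem.List.pyRange 0 w 1).map (fun c => ((r, c), PySem.List.pyGetD row c none))

def pvGridCells (grid : List (List (Option Int))) (w : Int) : List ((Int × Int) × Option Int) :=
  (PySem.List.enumerate grid).flatMap (fun p => pvRowCells p.1 p.2 w)

-- A's step on one cell
def pvCellStep (hb : List (Int × Int) × List (Int × Int)) (cl : (Int × Int) × Option Int) :
    List (Int × Int) × List (Int × Int) :=
  match cl.2 with
  | none => hb
  | some v =>
    if v > 0 then (hb.1, hb.2 ++ [cl.1])
    else if v < 0 then (hb.1 ++ [cl.1], hb.2)
    else hb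

-- B's step on one cell
def pvBStep (origin : Int × Int) (pred : Int → Bool)
    (best : Option ((Int × Int) × Int)) (cl : (Int × Int) × Option Int) :
    Option ((Int × Int) × Int) :=
  match cl.2 with
  | none => best
  | some v =>
    if pred v then
      let d := |origin.1 - cl.1.1| + |origin.2 - cl.1.2|
      match best with
      | none => some (cl.1, d)
      | some b => if d < b.2 then some (cl.1, d) else best
    else best

-- min's running step
def pvMinStep (k : (Int × Int) → Int) (best : Option (Int × Int)) (p : Int × Int) :
    Option (Int × Int) :=
  match best with
  | none => some p
  | some m => if k p < k m then some p else some m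

-- coordinates of the cells whose value satisfies pred, in scan order
def pvFiltOf (pred : Int → Bool) (L : List ((Int × Int) × Option Int)) : List (Int × Int) :=
  (L.filter (fun cl => match cl.2 with | some v => pred v | none => false)).map (fun cl => cl.1)

theorem pvFiltOf_cons (pred : Int → Bool) (cl : (Int × Int) × Option Int)
    (L : List ((Int × Int) × Option Int)) :
    pvFiltOf pred (cl :: L) =
      (if (match cl.2 with | some v => pred v | none => false) then [cl.1] else []) ++ pvFiltOf pred L := by
  unfold pvFiltOf
  rcases cl with ⟨p, o⟩
  cases o <;> simp [List.filter_cons] <;> split_ifs <;> simp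

theorem pvFoldl_flatMap {α γ β : Type} (l : List α) (g : α → List γ) (f : β → γ → β) :
    ∀ init : β, (l.flatMap g).foldl f init = l.foldl (fun acc x => (g x).foldl f acc) init := by
  induction l with
  | nil => intro init; simp
  | cons x t ih => intro init; simp [List.foldl_append, ih]

-- A's outer loop (index + pyGetD) is a fold over enumerate
theorem pvFoldl_range_getD {β : Type} (grid : List (List (Option Int)))
    (f : β → Int × List (Option Int) → β) :
    ∀ (a : Int) (init : β),
      (PySem.List.pyRange 0 (grid.length : Int) 1).foldl
        (fun acc r => f acc (a + r, PySem.List.pyGetD grid r [])) init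
      = (PySem.List.enumerate grid a).foldl f init := by
  induction grid with
  | nil =>
    intro a init
    simp [PySem.List.pyRange_one_eq_nil, PySem.List.enumerate]
  | cons x t ih =>
    intro a init
    have h1 : (PySem.List.pyRange 0 ((x :: t).length : Int) 1)
        = 0 :: PySem.List.pyRange 1 ((x :: t).length : Int) 1 := by
      refine PySem.List.pyRange_one_cons (by simp)
    rw [h1]
    have h2 : PySem.List.pyRange 1 ((x :: t).length : Int) 1
        = (PySem.List.pyRange 0 (t.length : Int) 1).map (fun r => 1 + r) := by
      rw [PySem.List.pyRange_one 1, PySem.List.pyRange_one 0, List.map_map]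
      have hlen : ((((x :: t).length : Int)) - 1).toNat = (((t.length : Int)) - 0).toNat := by
        simp only [List.length_cons]; push_cast; omega
      rw [hlen]
      apply List.map_congr_left
      intro k _
      simp only [Function.comp_apply]
      omega
    rw [List.foldl_cons, h2, List.foldl_map]
    have h3 : ∀ (acc : β) (r : Int), r ∈ PySem.List.pyRange 0 (t.length : Int) 1 →
        f acc (a + (1 + r), PySem.List.pyGetD (x :: t) (1 + r) []) =
        f acc ((a + 1) + r, PySem.List.pyGetD t r []) := by
      intro acc r hr
      rw [PySem.List.mem_pyRange_one] at hr
      have hge : (0:Int) ≤ r := hr.1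
      obtain ⟨n, rfl⟩ := Int.eq_ofNat_of_zero_le hge
      have : PySem.List.pyGetD (x :: t) (1 + (n : Int)) [] = PySem.List.pyGetD t (n : Int) [] := by
        have : (1 : Int) + (n : Int) = ((n + 1 : Nat) : Int) := by push_cast; ring
        rw [this, PySem.List.pyGetD_natCast, PySem.List.pyGetD_natCast]
        simp
      rw [this]
      congr 1
      rw [Prod.mk.injEq]
      constructor
      · ring
      · rfl
    rw [PySem.List.foldl_congr_mem _ _ _ _ h3]
    rw [ih (a + 1)]
    simp [PySem.List.enumerate]

-- A's accumulation over the cell list builds exactly the holes/blocks lists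
theorem pvCellStep_foldl (L : List ((Int × Int) × Option Int)) :
    ∀ hs bs, L.foldl pvCellStep (hs, bs)
      = (hs ++ pvFiltOf (fun v => decide (v < 0)) L, bs ++ pvFiltOf (fun v => decide (0 < v)) L) := by
  induction L with
  | nil => intro hs bs; simp [pvFiltOf]
  | cons cl t ih =>
    intro hs bs
    rcases cl with ⟨p, o⟩
    rw [List.foldl_cons]
    cases o with
    | none => simp [pvCellStep, pvFiltOf_cons, ih]
    | some v =>
      by_cases hpos : v > 0
      · have hneg : ¬ v < 0 := by omega
        simp [pvCellStep, hpos, hneg, pvFiltOf_cons, ih]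
      · by_cases hneg : v < 0
        · simp [pvCellStep, hpos, hneg, pvFiltOf_cons, ih]
        · simp [pvCellStep, hpos, hneg, pvFiltOf_cons, ih]

-- B's filtered running minimum is the min-fold over the filtered coordinates
theorem pvBStep_foldl (origin : Int × Int) (pred : Int → Bool)
    (L : List ((Int × Int) × Option Int)) :
    ∀ acc : Option (Int × Int),
      L.foldl (pvBStep origin pred) (acc.map (fun p => (p, pvManhattan origin p)))
      = ((pvFiltOf pred L).foldl (pvMinStep (fun p => pvManhattan origin p)) acc).map
          (fun p => (p, pvManhattan origin p)) := by
  induction L with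
  | nil => intro acc; simp [pvFiltOf]
  | cons cl t ih =>
    intro acc
    rcases cl with ⟨p, o⟩
    rw [List.foldl_cons, pvFiltOf_cons]
    cases o with
    | none => simpa [pvBStep] using ih acc
    | some v =>
      by_cases hp : pred v
      · have hstep : pvBStep origin pred (acc.map (fun q => (q, pvManhattan origin q))) (p, some v)
            = (pvMinStep (fun q => pvManhattan origin q) acc p).map
                (fun q => (q, pvManhattan origin q)) := by
          cases acc with
          | none => simp [pvBStep, pvMinStep, hp, pvManhattan]
          | some b =>
            have hd : ∀ q : Int × Int, |origin.1 - q.1| + |origin.2 - q.2| = pvManhattan origin q := by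
              intro q; rfl
            simp only [pvBStep, pvMinStep, hp, Option.map_some, if_true, hd]
            by_cases hlt : pvManhattan origin p < pvManhattan origin b
            · simp [hlt]
            · simp [hlt]
        rw [hstep, ih (pvMinStep (fun q => pvManhattan origin q) acc p)]
        simp [hp]
      · have hstep : pvBStep origin pred (acc.map (fun q => (q, pvManhattan origin q))) (p, some v)
            = acc.map (fun q => (q, pvManhattan origin q)) := by
          simp [pvBStep, hp]
        rw [hstep, ih acc]
        simp [hp]

-- PySem's min? IS the running strict-min fold
theorem pvMin?_eq_foldl (M : List (Int × Int)) (k : (Int × Int) → Int) :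
    PySem.List.min? M k = M.foldl (pvMinStep k) none := by
  unfold PySem.List.min?
  refine PySem.List.foldl_congr_mem _ _ _ _ ?_
  intro acc x _
  cases acc <;> rfl

-- the nested fold of A, flattened over the cell sequence
theorem pvA_fold (grid : List (List (Option Int))) (w : Int) (init : List (Int × Int) × List (Int × Int)) :
    (PySem.List.pyRange 0 (grid.length : Int) 1).foldl
      (fun hb r =>
        (PySem.List.pyRange 0 w 1).foldl
          (fun hb c =>
            match PySem.List.pyGetD (PySem.List.pyGetD grid r []) c none with
            | none => hb
            | some v =>
              if v > 0 then (hb.1, hb.2 ++ [(r, c)])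
              else if v < 0 then (hb.1 ++ [(r, c)], hb.2)
              else hb) hb) init
    = (pvGridCells grid w).foldl pvCellStep init := by
  unfold pvGridCells
  rw [pvFoldl_flatMap]
  rw [← pvFoldl_range_getD grid
      (fun acc rr => (pvRowCells rr.1 rr.2 w).foldl pvCellStep acc) 0 init]
  apply PySem.List.foldl_congr_mem
  intro acc r _
  unfold pvRowCells
  rw [List.foldl_map]
  simp only [zero_add]
  apply PySem.List.foldl_congr_mem
  intro acc2 c _
  simp only [pvCellStep]

-- the nested fold of B, flattened over the cell sequence
theorem pvB_fold (origin : Int × Int) (grid : List (List (Option Int))) (w : Int) (pred : Int → Bool) :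
    pvNearest origin grid w pred = (pvGridCells grid w).foldl (pvBStep origin pred) none := by
  unfold pvNearest pvGridCells
  rw [pvFoldl_flatMap]
  apply PySem.List.foldl_congr_mem
  intro acc rr _
  unfold pvRowCells
  rw [List.foldl_map]
  apply PySem.List.foldl_congr_mem
  intro acc2 c _
  simp only [pvBStep]

theorem pvNearest_eq_min? (origin : Int × Int) (grid : List (List (Option Int))) (w : Int)
    (pred : Int → Bool) :
    pvNearest origin grid w pred
      = (PySem.List.min? (pvFiltOf pred (pvGridCells grid w)) (fun p => pvManhattan origin p)).map
          (fun p => (p, pvManhattan origin p)) := by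
  rw [pvB_fold, pvMin?_eq_foldl]
  have := pvBStep_foldl origin pred (pvGridCells grid w) none
  simpa using this

-- ===== VERDICT (by name: the statement is the Claim_ definition above) =====
theorem distanceHeuristic_spec : Claim_equal_distanceHeuristic := by
  intro state problem _ _
  unfold Spec_distanceHeuristic
  rcases state with ⟨position, grid⟩
  cases grid with
  | nil =>
    simp [distanceHeuristic, distanceHeuristic_alt, PySem.List.pyRange_one_eq_nil]
  | cons g0 gs =>
    have hw : PySem.List.pyGetD (g0 :: gs) (0 : Int) [] = g0 := PySem.List.pyGetD_zero_cons _ _ _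
    set cells := pvGridCells (g0 :: gs) (g0.length : Int) with hcells
    set blocks := pvFiltOf (fun v => decide (0 < v)) cells with hblocks
    set holes := pvFiltOf (fun v => decide (v < 0)) cells with hholes
    have hA : distanceHeuristic (position, g0 :: gs) problem =
        (if holes = [] ∨ blocks = [] then 0
         else
           match PySem.List.min? blocks (fun x => pvManhattan position x) with
           | none => 0
           | some nb =>
             match PySem.List.min? holes (fun x => pvManhattan nb x) with
             | none => 0
             | some nh => pvManhattan position nb + pvManhattan nb nh) := by
      unfold distanceHeuristic
      simp only [hw]
      rw [pvA_fold (g0 :: gs) (g0.length : Int) ([], [])]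
      rw [pvCellStep_foldl]
      simp [hblocks, hholes, hcells]
    have hB : distanceHeuristic_alt (position, g0 :: gs) problem =
        (match PySem.List.min? blocks (fun p => pvManhattan position p) with
         | none => 0
         | some nb =>
           match PySem.List.min? holes (fun p => pvManhattan nb p) with
           | none => 0
           | some nh => pvManhattan position nb + pvManhattan nb nh) := by
      unfold distanceHeuristic_alt
      simp only
      rw [pvNearest_eq_min? position (g0 :: gs) (g0.length : Int) (fun v => decide (0 < v))]
      cases hmb : PySem.List.min? blocks (fun p => pvManhattan position p) with
      | none => simp [hcells]
      | some nb =>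
        simp only [Option.map_some]
        rw [pvNearest_eq_min? nb (g0 :: gs) (g0.length : Int) (fun v => decide (v < 0)),
            ← hcells, ← hholes]
        cases hmh : PySem.List.min? holes (fun p => pvManhattan nb p) <;> simp
    rw [hA, hB]
    by_cases hbe : blocks = []
    · have : PySem.List.min? blocks (fun p => pvManhattan position p) = none := by
        rw [PySem.List.min?_eq_none_iff]; exact hbe
      simp [hbe, PySem.List.min?]
    · by_cases hhe : holes = []
      · have : ∀ nb, PySem.List.min? holes (fun p => pvManhattan nb p) = none := by
          intro nb; rw [PySem.List.min?_eq_none_iff]; exact hhe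
        cases hmb : PySem.List.min? blocks (fun p => pvManhattan position p) with
        | none => simp [hhe]
        | some nb => simp [hhe, PySem.List.min?]
      · have hc : ¬ (holes = [] ∨ blocks = []) := by simp [hbe, hhe]
        rw [if_neg hc]
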